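-- pv_equiv track=rewrite | github.com/ag93/Leetcode | Alternating-Sort.py | alternatingSort
-- ===== SOURCE A (Python) =====
-- def alternatingSort(a):
--     import math
--     b = [0]*len(a)
--
--     b[0] = a[0]
--
--     if len(a) >= 2:
--         b[1] = a[-1]
--         for i in range(2, len(a)):
--             if i%2 == 0:
--                 b[i] = a[int(i/2)]
--             else:
--                 b[i] = a[-math.ceil(i/2)]
--
--     return sorted(set(b)) == b
-- ===== SOURCE B (Python) =====
-- def alternatingSort(a):
--     n = len(a)
--     prev = a[0]
--     for k in range(1, n):
--         cur = a[k // 2] if k % 2 == 0 else a[n - (k + 1) // 2]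
--         if cur <= prev:
--             return False
--         prev = cur
--     return True
-- ===== Notes on version B (the rewrite author's own statement) =====
-- stated objective: faster
-- what changed: B drops A's auxiliary array, set and sort entirely: it checks strict increase of the alternating sequence in a single early-exiting pass over adjacent pairs, computing each element directly from its index.
import Mathlib
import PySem

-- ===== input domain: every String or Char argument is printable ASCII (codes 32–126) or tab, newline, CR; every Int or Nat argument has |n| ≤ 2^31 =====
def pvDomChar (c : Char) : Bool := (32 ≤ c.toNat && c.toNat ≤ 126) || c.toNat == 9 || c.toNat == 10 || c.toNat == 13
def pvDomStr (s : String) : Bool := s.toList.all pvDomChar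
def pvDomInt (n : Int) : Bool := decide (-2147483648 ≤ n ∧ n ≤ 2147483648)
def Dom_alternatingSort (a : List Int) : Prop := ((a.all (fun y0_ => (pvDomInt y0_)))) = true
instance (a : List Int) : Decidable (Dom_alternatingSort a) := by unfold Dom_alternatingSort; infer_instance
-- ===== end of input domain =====

-- B replaces A's build-array / sort-a-set check by a single early-exiting linear pass over
-- adjacent pairs of the alternating sequence (objective: faster).

-- ===== PORT A =====
-- the body of A's for-loop (sets b[i] to the alternating element)
def altStep (a : List Int) (b : List Int) (i : Int) : List Int :=
  if PySem.Int.mod i 2 == 0 then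
    PySem.List.pySetD b i (PySem.List.pyGetD a (PySem.Int.truncdiv i 2) 0)
  else
    -- a[-math.ceil(i/2)]: -ceil(i/2) = (-i) // 2
    PySem.List.pySetD b i (PySem.List.pyGetD a (PySem.Int.floordiv (-i) 2) 0)

def alternatingSort (a : List Int) : Bool :=
  let n : Int := (a.length : Int)
  let b := List.replicate a.length (0 : Int)
  let b := PySem.List.pySetD b 0 (PySem.List.pyGetD a 0 0)
  let b :=
    if 2 ≤ n then
      let b := PySem.List.pySetD b 1 (PySem.List.pyGetD a (-1) 0)
      (PySem.List.pyRange 2 n 1).foldl (altStep a) b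
    else b
  PySem.List.sorted (PySem.Set.ofList b) (fun x => x) false == b

-- ===== PORT B =====
def altGo (a : List Int) (n : Int) (prev : Int) : List Int → Bool
  | [] => true
  | k :: ks =>
    let cur := if PySem.Int.mod k 2 == 0 then PySem.List.pyGetD a (PySem.Int.floordiv k 2) 0
               else PySem.List.pyGetD a (n - PySem.Int.floordiv (k + 1) 2) 0
    if cur ≤ prev then false else altGo a n cur ks

def alternatingSort_alt (a : List Int) : Bool :=
  let n : Int := (a.length : Int)
  altGo a n (PySem.List.pyGetD a 0 0) (PySem.List.pyRange 1 n 1)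

-- ===== PRECONDITION & SPEC =====
-- A reads the first element unconditionally, so it raises IndexError exactly on the empty list.
def Pre_alternatingSort (a : List Int) : Prop := a ≠ []
instance (a : List Int) : Decidable (Pre_alternatingSort a) := by unfold Pre_alternatingSort; infer_instance
def pvWitness_alternatingSort : List Int := [3, 1, 2]

def Spec_alternatingSort (a : List Int) (out : Bool) : Prop := out = alternatingSort_alt a
instance (a : List Int) (out : Bool) : Decidable (Spec_alternatingSort a out) := by unfold Spec_alternatingSort; infer_instance

-- ===== CLAIM (what is proved, stated in full; the proofs are below) =====
def Claim_equal_alternatingSort : Prop := ∀ (a : List Int), Dom_alternatingSort a → Pre_alternatingSort a → Spec_alternatingSort a (alternatingSort a)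

-- ===== LEMMAS AND PROOFS =====

-- the i-th element of the alternating rearrangement, in Nat arithmetic
def pvF (a : List Int) (i : Nat) : Int :=
  if i % 2 = 0 then a.getD (i / 2) 0 else a.getD (a.length - (i + 1) / 2) 0

-- the element B compares at loop index k
def hB (a : List Int) (n k : Int) : Int :=
  if PySem.Int.mod k 2 == 0 then PySem.List.pyGetD a (PySem.Int.floordiv k 2) 0
  else PySem.List.pyGetD a (n - PySem.Int.floordiv (k + 1) 2) 0

-- A's comparison sorted(set(b)) == b is exactly strict increase of b
theorem cmp_lemma (l : List Int) :
    (PySem.List.sorted (PySem.Set.ofList l) (fun x => x) false == l) = decide (l.Pairwise (· < ·)) := by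
  by_cases h : l.Pairwise (· < ·)
  · have hnd : l.Nodup := h.imp ne_of_lt
    rw [PySem.Set.ofList_eq_self_of_nodup l hnd,
        PySem.List.sorted_eq_self_of_pairwise l (fun x => x) (h.imp le_of_lt)]
    simp [h]
  · simp [h]
    intro he
    exact h (he ▸ PySem.List.sorted_ofList_pairwise_lt (xs := l))

-- B's loop is the chain check over the elements it visits
theorem altGo_chain (a : List Int) (n : Int) (ks : List Int) (prev : Int) :
    altGo a n prev ks = decide (List.IsChain (· < ·) (prev :: ks.map (hB a n))) := by
  induction ks generalizing prev with
  | nil => simp [altGo]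
  | cons k ks ih =>
    have hrw : altGo a n prev (k :: ks)
        = if hB a n k ≤ prev then false else altGo a n (hB a n k) ks := rfl
    rw [hrw]
    by_cases hle : hB a n k ≤ prev
    · simp [hle, List.isChain_cons_cons, not_lt.2 hle]
    · simp [hle, ih, List.isChain_cons_cons, not_le.1 hle]

theorem pvF_zero (a : List Int) : PySem.List.pyGetD a 0 0 = pvF a 0 := by
  simp [pvF, PySem.List.pyGetD_zero]

theorem hB_eq (a : List Int) (m : Nat) (_h1 : 1 ≤ m) (h2 : m < a.length) :
    hB a (a.length : Int) (m : Int) = pvF a m := by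
  have e1 : PySem.Int.mod (m : Int) 2 = ((m % 2 : Nat) : Int) := by
    exact_mod_cast PySem.Int.mod_natCast m 2
  have e2 : PySem.Int.floordiv (m : Int) 2 = ((m / 2 : Nat) : Int) := by
    exact_mod_cast PySem.Int.floordiv_natCast m 2
  have e3 : PySem.Int.floordiv ((m : Int) + 1) 2 = (((m + 1) / 2 : Nat) : Int) := by
    have : ((m : Int) + 1) = ((m + 1 : Nat) : Int) := by push_cast; ring
    rw [this]; exact_mod_cast PySem.Int.floordiv_natCast (m + 1) 2
  have e4 : (a.length : Int) - (((m + 1) / 2 : Nat) : Int)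
      = ((a.length - (m + 1) / 2 : Nat) : Int) := by
    have hle : (m + 1) / 2 ≤ a.length := by omega
    omega
  unfold hB pvF
  rw [e1, e2, e3, e4, PySem.List.pyGetD_natCast, PySem.List.pyGetD_natCast]
  by_cases hp : m % 2 = 0
  · simp only [hp, Nat.cast_zero, beq_self_eq_true, if_true]
  · have hz : ((m % 2 : Nat) : Int) ≠ 0 := by omega
    simp only [beq_iff_eq, hz, if_neg hp, if_false]

-- the list B visits carries exactly the tail of the alternating sequence
theorem mapB (a : List Int) (h1 : 1 ≤ a.length) :
    (PySem.List.pyRange 1 (a.length : Int) 1).map (hB a (a.length : Int))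
      = (List.range (a.length - 1)).map (fun j => pvF a (1 + j)) := by
  rw [PySem.List.pyRange_one]
  have ht : ((a.length : Int) - 1).toNat = a.length - 1 := by omega
  rw [ht, List.map_map]
  refine List.map_congr_left ?_
  intro j hj
  rw [List.mem_range] at hj
  have : (1 : Int) + (j : Int) = ((1 + j : Nat) : Int) := by push_cast; ring
  simp only [Function.comp, this]
  exact hB_eq a (1 + j) (by omega) (by omega)

-- one iteration of A's loop sets position m to pvF a m
theorem stepA (a b : List Int) (m : Nat) (_h1 : 2 ≤ m) (h2 : m < a.length) :
    altStep a b (m : Int) = b.set m (pvF a m) := by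
  have e1 : PySem.Int.mod (m : Int) 2 = ((m % 2 : Nat) : Int) := by
    exact_mod_cast PySem.Int.mod_natCast m 2
  have e2 : PySem.Int.truncdiv (m : Int) 2 = ((m / 2 : Nat) : Int) := by
    simp [PySem.Int.truncdiv]
  have e3 : PySem.Int.floordiv (-(m : Int)) 2 = -(((m + 1) / 2 : Nat) : Int) := by
    rw [PySem.Int.floordiv_eq_ediv_of_pos (by omega)]
    omega
  have hk1 : 0 < (m + 1) / 2 := by omega
  have hk2 : (m + 1) / 2 ≤ a.length := by omega
  unfold altStep
  rw [e1, e2, e3, PySem.List.pyGetD_natCast,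
      PySem.List.pyGetD_neg_natCast a ((m + 1) / 2) 0 hk1 hk2,
      PySem.List.pySetD_natCast, PySem.List.pySetD_natCast]
  by_cases hp : m % 2 = 0
  · simp only [hp, Nat.cast_zero, beq_self_eq_true, if_true]
    rw [pvF, if_pos hp]
  · have hz : ((m % 2 : Nat) : Int) ≠ 0 := by omega
    rw [if_neg (by simpa using hz), pvF, if_neg hp,
        List.getD_eq_getElem a 0 (by omega : a.length - (m + 1) / 2 < a.length)]

-- setting one position of a mapped range re-maps it
theorem set_map_range (n m : Nat) (g : Nat → Int) (v : Int) (_hm : m < n) :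
    ((List.range n).map g).set m v
      = (List.range n).map (fun j => if j = m then v else g j) := by
  apply List.ext_getElem
  · simp
  · intro i hi hi2
    rw [List.getElem_set]
    by_cases h : m = i
    · simp [h]
    · simp [h, show ¬(i = m) from fun hh => h hh.symm]

-- A's fold builds the prefix of the alternating sequence
theorem foldA (a : List Int) (_hn : 2 ≤ a.length) (t : Nat) (ht : 2 + t ≤ a.length) :
    (PySem.List.pyRange 2 ((2 + t : Nat) : Int) 1).foldl (altStep a)
        ((List.range a.length).map (fun j => if j < 2 then pvF a j else 0))
      = (List.range a.length).map (fun j => if j < 2 + t then pvF a j else 0) := by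
  induction t with
  | zero => rw [PySem.List.pyRange_one_eq_nil (by simp)]; rfl
  | succ t ih =>
    have hcast : (((2 + (t + 1) : Nat)) : Int) = ((2 + t : Nat) : Int) + 1 := by push_cast; ring
    rw [hcast, PySem.List.pyRange_one_succ_right (by push_cast; omega), List.foldl_append,
        ih (by omega)]
    simp only [List.foldl_cons, List.foldl_nil]
    rw [stepA a _ (2 + t) (by omega) (by omega),
        set_map_range a.length (2 + t) _ (pvF a (2 + t)) (by omega)]
    refine List.map_congr_left ?_
    intro j hj
    by_cases h : j = 2 + t <;> simp [h]
    omega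

-- the first two assignments of A, as a mapped range
theorem b2_char (a : List Int) (h2 : 2 ≤ a.length) :
    PySem.List.pySetD (PySem.List.pySetD (List.replicate a.length (0 : Int)) 0
        (PySem.List.pyGetD a 0 0)) 1 (PySem.List.pyGetD a (-1) 0)
      = (List.range a.length).map (fun j => if j < 2 then pvF a j else 0) := by
  rw [PySem.List.pySetD_of_nonneg _ _ (by omega : (0:Int) ≤ 1),
      PySem.List.pySetD_of_nonneg _ _ (by omega : (0:Int) ≤ 0),
      PySem.List.pyGetD_neg_ofNat a 1 0 (by omega) (by omega)]
  apply List.ext_getElem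
  · simp
  · intro i hi hi2
    simp only [List.length_set, List.length_replicate] at hi
    rw [List.getElem_set, List.getElem_set, List.getElem_replicate,
        List.getElem_map, List.getElem_range]
    norm_num
    rcases Nat.lt_or_ge i 2 with hlt | hge
    · interval_cases i
      · simp [pvF, PySem.List.pyGetD_zero]
      · simp only [pvF]
        norm_num
        rw [List.getElem?_eq_getElem (by omega : a.length - 1 < a.length)]
        rfl
    · rw [if_neg (by omega), if_neg (by omega), if_neg (by omega)]

-- equality of the two decided lists at the end
theorem tail_eq (a : List Int) (hn : 1 ≤ a.length) :
    pvF a 0 :: (List.range (a.length - 1)).map (fun j => pvF a (1 + j))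
      = (List.range a.length).map (pvF a) := by
  conv_rhs => rw [show a.length = (a.length - 1) + 1 by omega]
  rw [List.range_succ_eq_map, List.map_cons, List.map_map]
  refine congrArg (List.cons (pvF a 0)) (List.map_congr_left ?_)
  intro j _
  simp [Function.comp, Nat.succ_eq_add_one, Nat.add_comm]

-- ===== VERDICT (by name: the statement is the Claim_ definition above) =====
theorem alternatingSort_spec : Claim_equal_alternatingSort := by
  intro a _ hpre
  unfold Spec_alternatingSort
  have hn : 1 ≤ a.length := by
    cases a with
    | nil => exact absurd rfl hpre
    | cons x t => simp
  have hBside : alternatingSort_alt a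
      = decide (((List.range a.length).map (pvF a)).Pairwise (· < ·)) := by
    simp only [alternatingSort_alt]
    rw [altGo_chain, mapB a hn, pvF_zero, tail_eq a hn, decide_eq_decide]
    exact List.isChain_iff_pairwise
  rw [hBside]
  simp only [alternatingSort]
  by_cases h2 : (2 : Int) ≤ (a.length : Int)
  · rw [if_pos h2]
    have h2n : 2 ≤ a.length := by exact_mod_cast h2
    rw [b2_char a h2n]
    have hcast : (a.length : Int) = ((2 + (a.length - 2) : Nat) : Int) := by push_cast; omega
    rw [hcast, foldA a h2n (a.length - 2) (by omega), cmp_lemma]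
    have hmap : (List.range a.length).map (fun j => if j < 2 + (a.length - 2) then pvF a j else 0)
        = (List.range a.length).map (pvF a) := by
      refine List.map_congr_left ?_
      intro j hj
      rw [List.mem_range] at hj
      rw [if_pos (by omega)]
    rw [hmap]
  · rw [if_neg h2]
    have hn1 : a.length = 1 := by omega
    obtain ⟨x, rfl⟩ : ∃ x, a = [x] := by
      cases a with
      | nil => exact absurd rfl hpre
      | cons x t =>
        cases t with
        | nil => exact ⟨x, rfl⟩
        | cons y u => simp at hn1
    rw [cmp_lemma]
    have hb : PySem.List.pySetD (List.replicate ([x] : List Int).length (0 : Int)) 0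
        (PySem.List.pyGetD [x] 0 0) = [x] := rfl
    rw [hb]
    have hm : (List.range ([x] : List Int).length).map (pvF [x]) = [x] := rfl
    rw [hm]
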